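-- pv_equiv track=rewrite | github.com/Xrenya/Algorithms | yandex/Lecture_5/Contest/F/main.py | minimal_price
-- ===== SOURCE A (Python) =====
-- def minimal_price(nun_classes, min_power, data):
--     output = 0
--     spec_range = sorted(data.keys())
--     for i in range(nun_classes):
--         nowprice = 1001
--         for spec in spec_range:
--             if min_power[i] <= spec:
--                 if data[spec] < nowprice:
--                     nowprice = data[spec]
--         output += nowprice
--     return output
-- ===== SOURCE B (Python) =====
-- def minimal_price(nun_classes, min_power, data):
--     specs = sorted(data.keys())
--     n = len(specs)
--     # suf[j] = min over specs[j:] of data[spec], capped at 1001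
--     suf = [1001] * (n + 1)
--     for j in range(n - 1, -1, -1):
--         price = data[specs[j]]
--         suf[j] = price if price < suf[j + 1] else suf[j + 1]
--     output = 0
--     for i in range(nun_classes):
--         p = min_power[i]
--         lo, hi = 0, n
--         while lo < hi:  # binary search: first index with specs[idx] >= p
--             mid = (lo + hi) // 2
--             if specs[mid] < p:
--                 lo = mid + 1
--             else:
--                 hi = mid
--         output += suf[lo]
--     return output
-- ===== Notes on version B (the rewrite author's own statement) =====
-- stated objective: faster
-- what changed: Replaces A's per-class linear scan over all sorted specs by a suffix-minimum array over the sorted specs plus a binary search per class for the first spec >= the class's threshold; Pre_ (nun_classes <= len(min_power)) also excludes the corner where data is empty and nun_classes exceeds len(min_power): A's inner loop is then empty so min_power[i] is never evaluated and A returns 1001*nun_classes, while B unconditionally reads min_power[i] and raises IndexError.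
-- outside the precondition, e.g. on minimal_price(2, [], {}): A returns 2002, B raises IndexError
import Mathlib
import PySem

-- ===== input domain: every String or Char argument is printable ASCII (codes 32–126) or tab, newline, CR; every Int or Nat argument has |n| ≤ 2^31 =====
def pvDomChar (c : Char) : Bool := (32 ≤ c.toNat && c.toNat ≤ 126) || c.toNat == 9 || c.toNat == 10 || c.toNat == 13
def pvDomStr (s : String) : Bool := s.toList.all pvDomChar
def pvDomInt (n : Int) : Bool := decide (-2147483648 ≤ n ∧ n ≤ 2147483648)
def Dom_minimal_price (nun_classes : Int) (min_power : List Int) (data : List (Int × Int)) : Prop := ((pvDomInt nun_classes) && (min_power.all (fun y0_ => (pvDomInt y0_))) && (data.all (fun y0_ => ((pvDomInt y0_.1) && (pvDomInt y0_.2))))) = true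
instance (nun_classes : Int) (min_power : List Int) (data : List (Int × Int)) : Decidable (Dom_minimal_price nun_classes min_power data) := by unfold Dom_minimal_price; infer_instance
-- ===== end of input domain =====

-- B replaces A's per-class scan of all specs by a suffix-minimum array over the sorted
-- specs plus a hand-written binary search per class (equality of the RETURN value).

-- ===== PORT A =====
def minimal_price (nun_classes : Int) (min_power : List Int) (data : List (Int × Int)) : Int :=
  let d := PySem.Dict.mk data
  let spec_range := PySem.List.sorted (PySem.Dict.keys d) (fun x => x) false
  (PySem.List.pyRange 0 nun_classes 1).foldl (fun output i =>
    let nowprice := spec_range.foldl (fun nowprice spec =>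
      if PySem.List.pyGetD min_power i 0 ≤ spec then
        -- data[spec]: spec comes from data.keys(), so the lookup never raises; getD 0 is never the default
        if (PySem.Dict.get? d spec).getD 0 < nowprice then (PySem.Dict.get? d spec).getD 0
        else nowprice
      else nowprice) 1001
    output + nowprice) 0

-- ===== PORT B =====
-- the descending loop 'for j in range(n-1, -1, -1): suf[j] = min(data[specs[j]], suf[j+1])'
-- builds suf back-to-front; ported as the structural recursion computing suf[j] from suf[j+1]
def pvSufList (d : PySem.Dict Int Int) : List Int → List Int
  | [] => [1001]
  | s :: rest =>
    let tail := pvSufList d rest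
    let price := (PySem.Dict.get? d s).getD 0
    (if price < tail.headI then price else tail.headI) :: tail

-- the 'while lo < hi' binary search of Source B, step for step (lo, hi ≥ 0 throughout in Python)
def pvLowerBound (specs : List Int) (p : Int) (lo hi : Nat) : Nat :=
  if _h : lo < hi then
    -- mid = (lo + hi) // 2, inlined at its two uses
    if specs.getD ((lo + hi) / 2) 0 < p then pvLowerBound specs p ((lo + hi) / 2 + 1) hi
    else pvLowerBound specs p lo ((lo + hi) / 2)
  else lo
termination_by hi - lo
decreasing_by all_goals omega

def minimal_price_alt (nun_classes : Int) (min_power : List Int) (data : List (Int × Int)) : Int :=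
  let d := PySem.Dict.mk data
  let specs := PySem.List.sorted (PySem.Dict.keys d) (fun x => x) false
  let n := specs.length
  let suf := pvSufList d specs
  (PySem.List.pyRange 0 nun_classes 1).foldl (fun output i =>
    let p := PySem.List.pyGetD min_power i 0
    let lo := pvLowerBound specs p 0 n
    output + suf.getD lo 0) 0

-- ===== PRECONDITION & SPEC =====
-- Pre_ excludes the inputs with nun_classes exceeding len(min_power): there Python A raises
-- IndexError on min_power[i] (B too) — except when data is empty, where A's inner loop is empty,
-- min_power[i] is never evaluated and A returns 1001*nun_classes while B still raises IndexError.
def Pre_minimal_price (nun_classes : Int) (min_power : List Int) (data : List (Int × Int)) : Prop :=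
  nun_classes ≤ (min_power.length : Int)
instance (nun_classes : Int) (min_power : List Int) (data : List (Int × Int)) : Decidable (Pre_minimal_price nun_classes min_power data) := by unfold Pre_minimal_price; infer_instance

def pvWitness_minimal_price : Int × List Int × (List (Int × Int)) := (2, [3, 10], [(5, 100), (2, 7), (12, 50)])

def Spec_minimal_price (nun_classes : Int) (min_power : List Int) (data : List (Int × Int)) (out : Int) : Prop := out = minimal_price_alt nun_classes min_power data
instance (nun_classes : Int) (min_power : List Int) (data : List (Int × Int)) (out : Int) : Decidable (Spec_minimal_price nun_classes min_power data out) := by unfold Spec_minimal_price; infer_instance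

-- ===== CLAIM (what is proved, stated in full; the proofs are below) =====
def Claim_equal_minimal_price : Prop := ∀ (nun_classes : Int) (min_power : List Int) (data : List (Int × Int)), Dom_minimal_price nun_classes min_power data → Pre_minimal_price nun_classes min_power data → Spec_minimal_price nun_classes min_power data (minimal_price nun_classes min_power data)

-- ===== LEMMAS AND PROOFS =====

theorem pvGetD_mono (l : List Int) (hs : l.Pairwise (· ≤ ·)) (i j : Nat) (hj : j < l.length) (hij : i ≤ j) :
    l.getD i 0 ≤ l.getD j 0 := by
  rw [List.pairwise_iff_getElem] at hs
  rcases Nat.eq_or_lt_of_le hij with h | h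
  · subst h; rfl
  · rw [List.getD_eq_getElem _ _ (by omega), List.getD_eq_getElem _ _ hj]
    exact hs i j (by omega) hj h

theorem pvLB_char (l : List Int) (p : Int) (hs : l.Pairwise (· ≤ ·)) (lo hi : Nat)
    (h1 : lo ≤ hi) (h2 : hi ≤ l.length)
    (h3 : ∀ i, i < lo → l.getD i 0 < p)
    (h4 : ∀ i, hi ≤ i → i < l.length → p ≤ l.getD i 0) :
    pvLowerBound l p lo hi ≤ hi ∧
    (∀ i, i < pvLowerBound l p lo hi → l.getD i 0 < p) ∧
    (∀ i, pvLowerBound l p lo hi ≤ i → i < l.length → p ≤ l.getD i 0) := by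
  rw [pvLowerBound]
  split_ifs with hlt hcmp
  · have := pvLB_char l p hs ((lo + hi) / 2 + 1) hi (by omega) h2
      (fun i hi' => lt_of_le_of_lt (pvGetD_mono l hs i ((lo + hi) / 2) (by omega) (by omega)) hcmp) h4
    exact this
  · have := pvLB_char l p hs lo ((lo + hi) / 2) (by omega) ((by omega : (lo + hi) / 2 ≤ hi).trans h2) h3
      (fun i hi' hlen => le_trans (not_lt.mp hcmp) (pvGetD_mono l hs ((lo + hi) / 2) i hlen hi'))
    exact ⟨by omega, this.2.1, this.2.2⟩
  · exact ⟨by omega, h3, fun i hi' hlen => h4 i (by omega) hlen⟩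
termination_by hi - lo
decreasing_by all_goals omega

theorem pvSuf_len (d : PySem.Dict Int Int) (l : List Int) : (pvSufList d l).length = l.length + 1 := by
  induction l with
  | nil => rfl
  | cons s rest ih => simp [pvSufList, ih]

theorem pvIfMin (a b : Int) : (if a < b then a else b) = min a b := by
  split_ifs with h <;> omega

theorem pvSuf_getD (d : PySem.Dict Int Int) (l : List Int) (j : Nat) (hj : j ≤ l.length) :
    (pvSufList d l).getD j 0
      = ((l.drop j).map (fun s => (PySem.Dict.get? d s).getD 0)).foldl min 1001 := by
  induction l generalizing j with
  | nil => have : j = 0 := by simpa using hj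
           subst this; rfl
  | cons s rest ih =>
    cases j with
    | zero =>
      have htail : (pvSufList d rest).headI = (pvSufList d rest).getD 0 0 := by
        have hne : pvSufList d rest ≠ [] := by
          intro h; have := pvSuf_len d rest; rw [h] at this; simp at this
        rcases List.exists_cons_of_ne_nil hne with ⟨x, xs, hx⟩
        rw [hx]; rfl
      simp only [pvSufList, List.getD_cons_zero, List.drop_zero, List.map_cons, List.foldl_cons]
      rw [htail, ih 0 (by omega), pvIfMin]
      rw [min_comm (1001 : Int) _, List.foldl_assoc, List.drop_zero]
    | succ j' =>
      simp only [pvSufList, List.getD_cons_succ, List.drop_succ_cons]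
      exact ih j' (by simpa using hj)

theorem pvFilter_eq_drop (l : List Int) (p : Int) (r : Nat) (hr : r ≤ l.length)
    (h1 : ∀ i, i < r → l.getD i 0 < p)
    (h2 : ∀ i, r ≤ i → i < l.length → p ≤ l.getD i 0) :
    l.filter (fun s => decide (p ≤ s)) = l.drop r := by
  conv_lhs => rw [← List.take_append_drop r l]
  rw [List.filter_append]
  have ht : (l.take r).filter (fun s => decide (p ≤ s)) = [] := by
    rw [List.filter_eq_nil_iff]
    intro x hx
    rw [List.mem_take_iff_getElem] at hx
    rcases hx with ⟨i, hi, hx⟩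
    have := h1 i (by omega)
    rw [List.getD_eq_getElem _ _ (by omega)] at this
    simp [← hx]; omega
  have hd : (l.drop r).filter (fun s => decide (p ≤ s)) = l.drop r := by
    rw [List.filter_eq_self]
    intro x hx
    rw [List.mem_drop_iff_getElem] at hx
    rcases hx with ⟨i, hi, hx⟩
    have := h2 (r + i) (by omega) (by omega)
    rw [List.getD_eq_getElem _ _ (by omega)] at this
    simp [← hx]; exact this
  rw [ht, hd]; rfl

theorem pvInner_eq (d : PySem.Dict Int Int) (l : List Int) (hs : l.Pairwise (· ≤ ·)) (p : Int) :
    l.foldl (fun acc s => if p ≤ s then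
        (if (PySem.Dict.get? d s).getD 0 < acc then (PySem.Dict.get? d s).getD 0 else acc)
      else acc) 1001
    = (pvSufList d l).getD (pvLowerBound l p 0 l.length) 0 := by
  obtain ⟨hrle, hlt, hge⟩ := pvLB_char l p hs 0 l.length (by omega) (le_refl _)
    (by omega) (by intro i h1 h2; omega)
  rw [pvSuf_getD d l _ hrle, ← pvFilter_eq_drop l p _ hrle hlt hge]
  rw [List.foldl_map, List.foldl_filter]
  apply PySem.List.foldl_congr_mem
  intro acc s hmem
  split_ifs with h1 h2 <;> simp_all <;> omega

theorem minimal_price_spec : Claim_equal_minimal_price := by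
  intro nun_classes min_power data _hdom _hpre
  unfold Spec_minimal_price minimal_price minimal_price_alt
  apply PySem.List.foldl_congr_mem
  intro acc i _hmem
  have hs : (PySem.List.sorted (PySem.Dict.keys (PySem.Dict.mk data)) (fun x => x) false).Pairwise (· ≤ ·) := by
    simpa using PySem.List.sorted_pairwise (PySem.Dict.keys (PySem.Dict.mk data)) (fun x => x)
  have h := pvInner_eq (PySem.Dict.mk data) _ hs (PySem.List.pyGetD min_power i 0)
  show acc + _ = acc + _
  rw [h]
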